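-- pv_equiv track=rewrite | github.com/SethBurkart123/Covalt | backend/commands/streaming.py | is_allowed_attachment_mime
-- ===== SOURCE A (Python) =====
-- AGNO_ALLOWED_ATTACHMENT_MIME_TYPES = [
--     "image/*",
--     "audio/*",
--     "video/*",
--     "application/pdf",
--     "text/plain",
--     "text/csv",
--     "application/json",
--     "application/vnd.openxmlformats-officedocument.wordprocessingml.document",
--     "application/msword",
-- ]
--
-- def is_allowed_attachment_mime(mime_type: str) -> bool:
--     if not mime_type:
--         return False
--     for prefix, wildcard in [
--         ("image/", "image/*"),
--         ("audio/", "audio/*"),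
--         ("video/", "video/*"),
--     ]:
--         if mime_type.startswith(prefix):
--             return wildcard in AGNO_ALLOWED_ATTACHMENT_MIME_TYPES
--     return mime_type in AGNO_ALLOWED_ATTACHMENT_MIME_TYPES
-- ===== SOURCE B (Python) =====
-- AGNO_ALLOWED_ATTACHMENT_MIME_TYPES = [
--     "image/*",
--     "audio/*",
--     "video/*",
--     "application/pdf",
--     "text/plain",
--     "text/csv",
--     "application/json",
--     "application/vnd.openxmlformats-officedocument.wordprocessingml.document",
--     "application/msword",
-- ]
--
-- def is_allowed_attachment_mime(mime_type: str) -> bool: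
--     if not mime_type:
--         return False
--     for entry in AGNO_ALLOWED_ATTACHMENT_MIME_TYPES:
--         if entry.endswith("/*"):
--             if mime_type.startswith(entry[:-1]):
--                 return True
--         elif mime_type == entry:
--             return True
--     return False
-- ===== Notes on version B (the rewrite author's own statement) =====
-- stated objective: simpler
-- what changed: B drops A's hardcoded (prefix, wildcard) table and separate membership test: it makes one pass over AGNO_ALLOWED_ATTACHMENT_MIME_TYPES itself, deriving each wildcard prefix from entries ending in slash-star and comparing equality otherwise, so the allow-list is the single source of truth.
import Mathlib
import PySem

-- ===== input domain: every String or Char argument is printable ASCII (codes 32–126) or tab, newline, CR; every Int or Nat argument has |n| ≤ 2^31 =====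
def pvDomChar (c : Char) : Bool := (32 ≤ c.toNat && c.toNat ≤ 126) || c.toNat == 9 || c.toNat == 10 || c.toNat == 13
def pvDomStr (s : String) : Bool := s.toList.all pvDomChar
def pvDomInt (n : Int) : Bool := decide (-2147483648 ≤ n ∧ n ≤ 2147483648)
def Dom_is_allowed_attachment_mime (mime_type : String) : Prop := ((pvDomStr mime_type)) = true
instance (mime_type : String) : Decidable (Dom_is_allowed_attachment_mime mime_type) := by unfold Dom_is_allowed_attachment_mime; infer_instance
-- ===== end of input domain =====

-- B iterates over the allow-list itself, deriving wildcard prefixes from entries ending in "/*",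
-- instead of A's hardcoded (prefix, wildcard) table plus separate membership test (objective: simpler).

-- ===== PORT A =====
def pvAgnoAllowed : List String :=
  ["image/*", "audio/*", "video/*", "application/pdf", "text/plain", "text/csv",
   "application/json",
   "application/vnd.openxmlformats-officedocument.wordprocessingml.document",
   "application/msword"]

-- the 'for prefix, wildcard in [...]' loop of A, falling through to the membership test
def pvLoopA (m : String) : List (String × String) → Bool
  | [] => pvAgnoAllowed.contains m
  | (pre, wild) :: rest =>
    if PySem.Str.startswith m pre then pvAgnoAllowed.contains wild else pvLoopA m rest

def is_allowed_attachment_mime (mime_type : String) : Bool :=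
  if mime_type = "" then false
  else pvLoopA mime_type [("image/", "image/*"), ("audio/", "audio/*"), ("video/", "video/*")]

-- ===== PORT B =====
-- B's 'for entry in AGNO_ALLOWED_ATTACHMENT_MIME_TYPES' loop
def pvLoopB (m : String) : List String → Bool
  | [] => false
  | e :: rest =>
    if PySem.Str.endswith e "/*" then
      if PySem.Str.startswith m (PySem.Str.slice e none (some (-1))) then true else pvLoopB m rest
    else if m = e then true else pvLoopB m rest

def is_allowed_attachment_mime_alt (mime_type : String) : Bool :=
  if mime_type = "" then false
  else pvLoopB mime_type pvAgnoAllowed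

-- ===== PRECONDITION & SPEC =====
def Spec_is_allowed_attachment_mime (mime_type : String) (out : Bool) : Prop := out = is_allowed_attachment_mime_alt mime_type
instance (mime_type : String) (out : Bool) : Decidable (Spec_is_allowed_attachment_mime mime_type out) := by unfold Spec_is_allowed_attachment_mime; infer_instance

-- ===== CLAIM (what is proved, stated in full; the proofs are below) =====
def Claim_equal_is_allowed_attachment_mime : Prop := ∀ (mime_type : String), Dom_is_allowed_attachment_mime mime_type → Spec_is_allowed_attachment_mime mime_type (is_allowed_attachment_mime mime_type)

-- ===== LEMMAS AND PROOFS =====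

theorem pv_main (m : String) :
    is_allowed_attachment_mime m = is_allowed_attachment_mime_alt m := by
  unfold is_allowed_attachment_mime is_allowed_attachment_mime_alt
  by_cases h0 : m = ""
  · simp [h0]
  · simp only [if_neg h0]
    simp only [pvAgnoAllowed, pvLoopA, pvLoopB]
    have e1 : PySem.Str.endswith "image/*" "/*" = true := by decide
    have e2 : PySem.Str.endswith "audio/*" "/*" = true := by decide
    have e3 : PySem.Str.endswith "video/*" "/*" = true := by decide
    have n4 : PySem.Str.endswith "application/pdf" "/*" = false := by decide
    have n5 : PySem.Str.endswith "text/plain" "/*" = false := by decide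
    have n6 : PySem.Str.endswith "text/csv" "/*" = false := by decide
    have n7 : PySem.Str.endswith "application/json" "/*" = false := by decide
    have n8 : PySem.Str.endswith "application/vnd.openxmlformats-officedocument.wordprocessingml.document" "/*" = false := by decide
    have n9 : PySem.Str.endswith "application/msword" "/*" = false := by decide
    have s1 : PySem.Str.slice "image/*" none (some (-1)) = "image/" := by decide
    have s2 : PySem.Str.slice "audio/*" none (some (-1)) = "audio/" := by decide
    have s3 : PySem.Str.slice "video/*" none (some (-1)) = "video/" := by decide
    simp only [e1, e2, e3, n4, n5, n6, n7, n8, n9, s1, s2, s3, if_true]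
    by_cases h1 : PySem.Chars.startswith m.toList ['i','m','a','g','e','/']
    · simp [h1]
    · by_cases h2 : PySem.Chars.startswith m.toList ['a','u','d','i','o','/']
      · simp [h2]
      · by_cases h3 : PySem.Chars.startswith m.toList ['v','i','d','e','o','/']
        · simp [h3]
        · have hm1 : m ≠ "image/*" := by rintro rfl; exact h1 (by decide)
          have hm2 : m ≠ "audio/*" := by rintro rfl; exact h2 (by decide)
          have hm3 : m ≠ "video/*" := by rintro rfl; exact h3 (by decide)
          simp [h1, h2, h3, hm1, hm2, hm3]

-- ===== VERDICT (by name: the statement is the Claim_ definition above) =====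
theorem is_allowed_attachment_mime_spec : Claim_equal_is_allowed_attachment_mime := by
  intro m _
  exact pv_main m
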